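-- pv_equiv track=rewrite | github.com/PitPodStudios/Blender-Friend-Share | CoffeeCup Demo/4.5/4.5/extensions/blender_org/boltfactory/createMesh.py | Fill_Ring_Face
-- ===== SOURCE A (Python) =====
-- def Fill_Ring_Face(OFFSET, NUM, FACE_DOWN=0):
--     """
--     Returns a list of faces that makes up a fill pattern for a circle.
--     :param OFFSET: (int) - starting vertex.
--     :param NUM: (int) - number of vertices to use making the fill.
--     :param FACE_DOWN: (bool) - used to manage the surface normal direction.
--     :return: (list) - face list, (maybe empty).
--     """
--     Ret = []
--     Face = [1, 2, 0]
--     TempFace = [0, 0, 0]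
--     # A = 0  # UNUSED
--     B = 1
--     C = 2
--     if NUM < 3:
--         return []                   # None   <--- 'NoneType' object is not iterable
--     for i in range(NUM - 2):
--         if (i % 2):
--             TempFace[0] = Face[C]
--             TempFace[1] = Face[C] + 1
--             TempFace[2] = Face[B]
--             if FACE_DOWN:
--                 Ret.append([OFFSET + Face[2], OFFSET + Face[1], OFFSET + Face[0]])
--             else:
--                 Ret.append([OFFSET + Face[0], OFFSET + Face[1], OFFSET + Face[2]])
--         else:
--             TempFace[0] = Face[C]
--             if Face[C] == 0:
--                 TempFace[1] = NUM - 1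
--             else:
--                 TempFace[1] = Face[C] - 1
--             TempFace[2] = Face[B]
--             if FACE_DOWN:
--                 Ret.append([OFFSET + Face[0], OFFSET + Face[1], OFFSET + Face[2]])
--             else:
--                 Ret.append([OFFSET + Face[2], OFFSET + Face[1], OFFSET + Face[0]])
--
--         Face[0] = TempFace[0]
--         Face[1] = TempFace[1]
--         Face[2] = TempFace[2]
--     return Ret
-- ===== SOURCE B (Python) =====
-- def Fill_Ring_Face(OFFSET, NUM, FACE_DOWN=0):
--     """
--     Returns a list of faces that makes up a fill pattern for a circle.
--     Builds the zig-zag vertex order first, then emits one face per window.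
--     """
--     if NUM < 3:
--         return []
--     # zig-zag vertex order: 1, 0, then alternately next low / next high index
--     S = [1, 0]
--     lo, hi = 2, NUM - 1
--     while len(S) < NUM:
--         S.append(lo)
--         lo += 1
--         if len(S) < NUM:
--             S.append(hi)
--             hi -= 1
--     faces = []
--     for i in range(NUM - 2):
--         if i % 2:
--             t = [S[i], S[i + 2], S[i + 1]]
--         else:
--             t = [S[i + 1], S[i + 2], S[i]]
--         if FACE_DOWN:
--             t.reverse()
--         faces.append([OFFSET + v for v in t])
--     return faces
-- ===== Notes on version B (the rewrite author's own statement) =====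
-- stated objective: simpler
-- what changed: Replaces A's per-iteration Face/TempFace mutable state machine (with its wrap-around branch) by first building the zig-zag vertex order S once and then emitting each face as a stateless parity-selected window over S.
import Mathlib
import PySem

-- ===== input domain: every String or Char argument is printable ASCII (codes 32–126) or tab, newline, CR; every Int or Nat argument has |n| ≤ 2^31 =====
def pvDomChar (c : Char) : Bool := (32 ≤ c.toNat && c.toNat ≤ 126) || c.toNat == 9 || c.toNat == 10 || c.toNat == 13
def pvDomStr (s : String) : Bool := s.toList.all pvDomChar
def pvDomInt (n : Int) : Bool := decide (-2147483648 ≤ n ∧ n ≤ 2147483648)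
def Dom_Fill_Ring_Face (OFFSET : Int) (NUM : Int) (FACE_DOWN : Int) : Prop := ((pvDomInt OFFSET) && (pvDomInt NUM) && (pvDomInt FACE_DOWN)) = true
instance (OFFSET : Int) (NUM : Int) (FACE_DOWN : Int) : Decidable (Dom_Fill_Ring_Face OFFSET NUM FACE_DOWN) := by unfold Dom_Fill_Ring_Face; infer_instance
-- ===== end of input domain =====

-- B replaces A's mutating Face/TempFace state machine by a stateless decomposition:
-- build the zig-zag vertex order once, then emit each face as a window over it (objective: simpler).

-- ===== PORT A =====
-- one iteration of A's loop body; state = (Ret, Face0, Face1, Face2)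
def fillStep (OFFSET : Int) (NUM : Int) (FACE_DOWN : Int)
    (st : List (List Int) × Int × Int × Int) (i : Int) : List (List Int) × Int × Int × Int :=
  let Ret := st.1
  let f0 := st.2.1
  let f1 := st.2.2.1
  let f2 := st.2.2.2
  if PySem.Int.mod i 2 ≠ 0 then
    let Ret' := if FACE_DOWN ≠ 0 then Ret ++ [[OFFSET + f2, OFFSET + f1, OFFSET + f0]]
                else Ret ++ [[OFFSET + f0, OFFSET + f1, OFFSET + f2]]
    (Ret', f2, f2 + 1, f1)
  else
    let t1 := if f2 = 0 then NUM - 1 else f2 - 1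
    let Ret' := if FACE_DOWN ≠ 0 then Ret ++ [[OFFSET + f0, OFFSET + f1, OFFSET + f2]]
                else Ret ++ [[OFFSET + f2, OFFSET + f1, OFFSET + f0]]
    (Ret', f2, t1, f1)

def Fill_Ring_Face (OFFSET : Int) (NUM : Int) (FACE_DOWN : Int) : List (List Int) :=
  if NUM < 3 then []
  else ((PySem.List.pyRange 0 (NUM - 2) 1).foldl (fillStep OFFSET NUM FACE_DOWN) ([], 1, 2, 0)).1

-- ===== PORT B =====
-- the while loop of Source B: append next low index, then (if room) next high index
def zig (lo hi : Int) : Nat → List Int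
  | 0 => []
  | 1 => [lo]
  | (n + 2) => lo :: hi :: zig (lo + 1) (hi - 1) n

-- the full zig-zag vertex order S of Source B
def zigS (NUM : Int) : List Int := 1 :: 0 :: zig 2 (NUM - 1) (NUM - 2).toNat

def Fill_Ring_Face_alt (OFFSET : Int) (NUM : Int) (FACE_DOWN : Int) : List (List Int) :=
  if NUM < 3 then []
  else
    let S := zigS NUM
    (PySem.List.pyRange 0 (NUM - 2) 1).map (fun i =>
      let t := if PySem.Int.mod i 2 ≠ 0 then
                 [PySem.List.pyGetD S i 0, PySem.List.pyGetD S (i + 2) 0, PySem.List.pyGetD S (i + 1) 0]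
               else
                 [PySem.List.pyGetD S (i + 1) 0, PySem.List.pyGetD S (i + 2) 0, PySem.List.pyGetD S i 0]
      let t := if FACE_DOWN ≠ 0 then t.reverse else t
      t.map (fun v => OFFSET + v))

-- ===== PRECONDITION & SPEC =====
def Spec_Fill_Ring_Face (OFFSET : Int) (NUM : Int) (FACE_DOWN : Int) (out : List (List Int)) : Prop := out = Fill_Ring_Face_alt OFFSET NUM FACE_DOWN
instance (OFFSET : Int) (NUM : Int) (FACE_DOWN : Int) (out : List (List Int)) : Decidable (Spec_Fill_Ring_Face OFFSET NUM FACE_DOWN out) := by unfold Spec_Fill_Ring_Face; infer_instance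

-- ===== CLAIM (what is proved, stated in full; the proofs are below) =====
def Claim_equal_Fill_Ring_Face : Prop := ∀ (OFFSET : Int) (NUM : Int) (FACE_DOWN : Int), Dom_Fill_Ring_Face OFFSET NUM FACE_DOWN → Spec_Fill_Ring_Face OFFSET NUM FACE_DOWN (Fill_Ring_Face OFFSET NUM FACE_DOWN)

-- ===== LEMMAS AND PROOFS =====

-- closed form of the zig-zag order: sIdx NUM k = S[k]
def sIdx (NUM : Int) : Nat → Int
  | 0 => 1
  | 1 => 0
  | (k + 2) => if k % 2 = 0 then (k / 2 : Nat) + 2 else NUM - 1 - (k / 2 : Nat)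

lemma zig_getD (m : Nat) : ∀ (lo hi : Int) (j : Nat), j < m →
    (zig lo hi m).getD j 0 = if j % 2 = 0 then lo + (j / 2 : Nat) else hi - (j / 2 : Nat) := by
  induction m using Nat.strong_induction_on with
  | _ m ih =>
    intro lo hi j hj
    match m, hj with
    | 1, _ =>
      interval_cases j
      simp [zig]
    | (n + 2), _ =>
      match j with
      | 0 => simp [zig]
      | 1 => simp [zig]
      | (k + 2) =>
        have hk : k < n := by omega
        have := ih n (by omega) (lo + 1) (hi - 1) k hk
        simp only [zig, List.getD_cons_succ]
        rw [this]
        have h2 : (k + 2) % 2 = k % 2 := by omega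
        have h3 : (k + 2) / 2 = k / 2 + 1 := by omega
        rw [h2, h3]
        split <;> push_cast <;> ring

lemma zigS_getD (NUM : Int) (h3 : 3 ≤ NUM) (k : Nat) (hk : (k : Int) < NUM) :
    (zigS NUM).getD k 0 = sIdx NUM k := by
  match k with
  | 0 => simp [zigS, sIdx]
  | 1 => simp [zigS, sIdx]
  | (j + 2) =>
    have hj : j < (NUM - 2).toNat := by omega
    simp only [zigS, List.getD_cons_succ, sIdx]
    rw [zig_getD _ 2 (NUM - 1) j hj]
    split <;> ring

-- the face B emits at step k, written over the closed form
def faceB (OFFSET NUM FACE_DOWN : Int) (k : Nat) : List Int :=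
  let t := if k % 2 = 1 then [sIdx NUM k, sIdx NUM (k + 2), sIdx NUM (k + 1)]
           else [sIdx NUM (k + 1), sIdx NUM (k + 2), sIdx NUM k]
  (if FACE_DOWN ≠ 0 then t.reverse else t).map (fun v => OFFSET + v)

-- recurrence of the zig-zag order, matching A's TempFace update
lemma sIdx_rec_odd (NUM : Int) (k : Nat) (hk : k % 2 = 1) :
    sIdx NUM (k + 3) = sIdx NUM (k + 1) + 1 := by
  match k with
  | (j + 1) =>
    have hj : j % 2 = 0 := by omega
    simp only [sIdx]
    have h1 : (j + 2) % 2 = 0 := by omega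
    have h2 : j % 2 = 0 := hj
    rw [if_pos h1, if_pos h2]
    have : (j + 2) / 2 = j / 2 + 1 := by omega
    rw [this]; push_cast; ring

lemma sIdx_rec_even (NUM : Int) (h3 : 3 ≤ NUM) (k : Nat) (hk : k % 2 = 0)
    (hlt : (k : Int) < NUM - 2) :
    sIdx NUM (k + 3) = if sIdx NUM (k + 1) = 0 then NUM - 1 else sIdx NUM (k + 1) - 1 := by
  match k with
  | 0 => simp [sIdx]
  | (j + 2) =>
    have hj : j % 2 = 0 := by omega
    simp only [sIdx]
    have h1 : (j + 3) % 2 = 1 := by omega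
    have h2 : (j + 1) % 2 = 1 := by omega
    have hne : NUM - 1 - ((j + 1) / 2 : Nat) ≠ 0 := by
      have : ((j + 1) / 2 : Nat) ≤ j + 2 := by omega
      omega
    have hd : (j + 3) / 2 = (j + 1) / 2 + 1 := by omega
    rw [if_neg (show ¬ (j + 3) % 2 = 0 by omega), if_neg (show ¬ (j + 1) % 2 = 0 by omega),
        if_neg hne, hd]
    push_cast; ring

-- A's loop invariant: starting from face (s j, s (j+2), s (j+1)), m more steps
-- append faces faceB j, …, faceB (j+m-1) and land on face (s (j+m), s (j+m+2), s (j+m+1)).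
lemma fold_inv (OFFSET NUM FACE_DOWN : Int) (h3 : 3 ≤ NUM) :
    ∀ (m j : Nat), (j : Int) + m ≤ NUM - 2 → ∀ (Ret : List (List Int)),
    (PySem.List.pyRange j ((j : Int) + m) 1).foldl (fillStep OFFSET NUM FACE_DOWN)
        (Ret, sIdx NUM j, sIdx NUM (j + 2), sIdx NUM (j + 1))
      = (Ret ++ (List.range m).map (fun k => faceB OFFSET NUM FACE_DOWN (j + k)),
         sIdx NUM (j + m), sIdx NUM (j + m + 2), sIdx NUM (j + m + 1)) := by
  intro m
  induction m with
  | zero =>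
    intro j _ Ret
    rw [PySem.List.pyRange_one_eq_nil (by omega)]
    simp
  | succ n ih =>
    intro j hjm Ret
    have hj1 : ((j : Int) + 1) = ((j + 1 : Nat) : Int) := by push_cast; ring
    rw [PySem.List.pyRange_one_cons (by omega)]
    simp only [List.foldl_cons]
    have hmod : PySem.Int.mod (j : Int) 2 = ((j % 2 : Nat) : Int) := by
      exact_mod_cast PySem.Int.mod_natCast j 2
    have hstep : fillStep OFFSET NUM FACE_DOWN
        (Ret, sIdx NUM j, sIdx NUM (j + 2), sIdx NUM (j + 1)) (j : Int)
        = (Ret ++ [faceB OFFSET NUM FACE_DOWN j],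
           sIdx NUM (j + 1), sIdx NUM (j + 3), sIdx NUM (j + 2)) := by
      rcases Nat.mod_two_eq_zero_or_one j with hj2 | hj2
      · have hrec := sIdx_rec_even NUM h3 j hj2 (by omega)
        simp only [fillStep, faceB, hmod, hj2]
        rw [hrec]
        by_cases hfd : FACE_DOWN ≠ 0 <;> simp [hfd]
      · have hrec := sIdx_rec_odd NUM j hj2
        simp only [fillStep, faceB, hmod, hj2]
        rw [hrec]
        by_cases hfd : FACE_DOWN ≠ 0 <;> simp [hfd]
    rw [hstep]
    have hcast : (j : Int) + ((n + 1 : Nat) : Int) = ((j + 1 : Nat) : Int) + ((n : Nat) : Int) := by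
      push_cast; ring
    have IH := ih (j + 1) (by push_cast at hjm ⊢; omega) (Ret ++ [faceB OFFSET NUM FACE_DOWN j])
    simp only [show j + 1 + 2 = j + 3 from by omega, show j + 1 + 1 = j + 2 from by omega] at IH
    rw [hj1, hcast, IH]
    rw [List.range_succ_eq_map]
    simp only [List.map_cons, List.map_map, List.append_assoc, List.singleton_append,
      Nat.add_zero, Prod.mk.injEq]
    refine ⟨?_, ?_, ?_, ?_⟩
    · congr 1
      congr 1
      apply List.map_congr_left
      intro k _
      simp only [Function.comp_apply]
      congr 1
      omega
    · congr 1; omega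
    · congr 1; omega
    · congr 1; omega

-- B's emitted face at i (a nonnegative Int index) equals faceB
lemma alt_face (OFFSET NUM FACE_DOWN : Int) (h3 : 3 ≤ NUM) (k : Nat) (hk : (k : Int) < NUM - 2) :
    (let t := if PySem.Int.mod (k : Int) 2 ≠ 0 then
                 [PySem.List.pyGetD (zigS NUM) (k : Int) 0, PySem.List.pyGetD (zigS NUM) ((k : Int) + 2) 0, PySem.List.pyGetD (zigS NUM) ((k : Int) + 1) 0]
               else
                 [PySem.List.pyGetD (zigS NUM) ((k : Int) + 1) 0, PySem.List.pyGetD (zigS NUM) ((k : Int) + 2) 0, PySem.List.pyGetD (zigS NUM) (k : Int) 0]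
     (if FACE_DOWN ≠ 0 then t.reverse else t).map (fun v => OFFSET + v))
    = faceB OFFSET NUM FACE_DOWN k := by
  have e1 : (k : Int) + 1 = ((k + 1 : Nat) : Int) := by push_cast; ring
  have e2 : (k : Int) + 2 = ((k + 2 : Nat) : Int) := by push_cast; ring
  have g0 := zigS_getD NUM h3 k (by omega)
  have g1 := zigS_getD NUM h3 (k + 1) (by push_cast; omega)
  have g2 := zigS_getD NUM h3 (k + 2) (by push_cast; omega)
  have hmod : PySem.Int.mod (k : Int) 2 = ((k % 2 : Nat) : Int) := by
    exact_mod_cast PySem.Int.mod_natCast k 2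
  have hiff : (((k % 2 : Nat) : Int) ≠ 0) ↔ (k % 2 = 1) := by omega
  simp only [e1, e2, PySem.List.pyGetD_natCast, g0, g1, g2, hmod, faceB, hiff]

theorem fill_ring_eq (OFFSET NUM FACE_DOWN : Int) :
    Fill_Ring_Face OFFSET NUM FACE_DOWN = Fill_Ring_Face_alt OFFSET NUM FACE_DOWN := by
  unfold Fill_Ring_Face Fill_Ring_Face_alt
  by_cases h : NUM < 3
  · simp [h]
  · have h3 : 3 ≤ NUM := by omega
    rw [if_neg h, if_neg h]
    have hfold := fold_inv OFFSET NUM FACE_DOWN h3 (NUM - 2).toNat 0 (by omega) []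
    simp only [Nat.cast_zero, zero_add, List.nil_append] at hfold
    rw [show (sIdx NUM 0, sIdx NUM 2, sIdx NUM 1) = ((1 : Int), (2 : Int), (0 : Int)) from by
      simp [sIdx]] at hfold
    rw [show (NUM - 2 : Int) = (((NUM - 2).toNat : Nat) : Int) from by omega, hfold]
    rw [PySem.List.pyRange_zero_natCast, List.map_map]
    apply List.map_congr_left
    intro k hkmem
    have hk : (k : Int) < NUM - 2 := by
      have := List.mem_range.mp hkmem
      omega
    have := alt_face OFFSET NUM FACE_DOWN h3 k hk
    simpa using this.symm

-- ===== VERDICT (by name: the statement is the Claim_ definition above) =====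
theorem Fill_Ring_Face_spec : Claim_equal_Fill_Ring_Face := by
  intro OFFSET NUM FACE_DOWN _
  unfold Spec_Fill_Ring_Face
  exact fill_ring_eq OFFSET NUM FACE_DOWN
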